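-- pv_equiv track=rewrite | github.com/julia-villa/AI-Fitness | src/stage3/manifest.py | get_feedback_spans
-- ===== SOURCE A (Python) =====
-- from typing import Any, Sequence
--
-- def get_feedback_spans(
--     feedbacks: Sequence[str],
-- ) -> list[tuple[str, int, int]]:
--     """Collapse a dense per-frame feedback sequence into temporally grouped spans."""
--     feedback_spans: list[tuple[str, int, int]] = []
--     current_feedback = None
--     start_idx = None
--
--     for index, feedback in enumerate(feedbacks):
--         if current_feedback is not None and current_feedback != feedback:
--             feedback_spans.append((current_feedback, int(start_idx), index - 1))
--             current_feedback = None
--             start_idx = None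
--         if feedback and not current_feedback:
--             current_feedback = feedback
--             start_idx = index
--
--     if current_feedback is not None and start_idx is not None:
--         feedback_spans.append((current_feedback, int(start_idx), len(feedbacks) - 1))
--
--     return feedback_spans
-- ===== SOURCE B (Python) =====
-- def get_feedback_spans(feedbacks):
--     """Collapse a dense per-frame feedback sequence into temporally grouped spans."""
--     spans = []
--     i, n = 0, len(feedbacks)
--     while i < n:
--         j = i + 1
--         while j < n and feedbacks[j] == feedbacks[i]:
--             j += 1
--         if feedbacks[i]:
--             spans.append((feedbacks[i], i, j - 1))
--         i = j
--     return spans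
-- ===== Notes on version B (the rewrite author's own statement) =====
-- stated objective: alternative
-- what changed: Replaces A's per-element state machine (current_feedback/start_idx with a post-loop flush) by a two-pointer run scan: an outer loop jumps run by run, an inner scan finds each maximal run of equal values, emitting a span only for non-empty values; no carried state and no final flush.
import Mathlib
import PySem

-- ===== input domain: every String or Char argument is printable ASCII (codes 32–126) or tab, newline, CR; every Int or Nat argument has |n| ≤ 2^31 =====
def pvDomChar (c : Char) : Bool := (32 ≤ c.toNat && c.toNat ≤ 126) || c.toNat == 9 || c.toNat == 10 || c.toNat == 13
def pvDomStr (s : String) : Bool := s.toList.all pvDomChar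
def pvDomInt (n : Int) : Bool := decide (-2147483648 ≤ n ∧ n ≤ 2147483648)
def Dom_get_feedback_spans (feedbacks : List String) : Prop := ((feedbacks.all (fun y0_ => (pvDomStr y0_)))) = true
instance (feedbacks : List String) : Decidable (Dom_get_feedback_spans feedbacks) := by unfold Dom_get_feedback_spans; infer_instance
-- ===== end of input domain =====

-- B replaces A's carried-state scan (current_feedback/start_idx + final flush) by a
-- two-pointer run scan that consumes one maximal run per outer step (alternative, same cost).


-- ===== PORT A =====
-- One iteration of A's for-loop body (same two if-statements, same state).
def aStep (st : List (String × Int × Int) × Option String × Option Int)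
    (index : Int) (feedback : String) :
    List (String × Int × Int) × Option String × Option Int :=
  let spans := st.1
  let cur := st.2.1
  let start := st.2.2
  -- 'if current_feedback is not None and current_feedback != feedback'
  let st2 :=
    match cur with
    | some c =>
        if c ≠ feedback then
          (spans ++ [(c, start.getD 0, index - 1)], (none : Option String), (none : Option Int))
        else (spans, some c, start)
    | none => (spans, none, start)
  -- 'if feedback and not current_feedback' (Python truthiness: None and "" are falsy)
  if feedback ≠ "" ∧ (st2.2.1 = none ∨ st2.2.1 = some "") then
    (st2.1, some feedback, some index)
  else st2

-- A's for-loop over enumerate(feedbacks), index carried explicitly.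
def aLoop (st : List (String × Int × Int) × Option String × Option Int)
    (index : Int) : List String → List (String × Int × Int) × Option String × Option Int
  | [] => st
  | feedback :: rest => aLoop (aStep st index feedback) (index + 1) rest

def get_feedback_spans (feedbacks : List String) : List (String × Int × Int) :=
  let st := aLoop ([], none, none) 0 feedbacks
  match st.2.1, st.2.2 with
  | some c, some q => st.1 ++ [(c, q, (feedbacks.length : Int) - 1)]
  | _, _ => st.1

-- ===== PORT B =====
-- Inner while loop of B: length of the maximal leading run of `rest` equal to x.
def runLen (x : String) : List String → Nat
  | [] => 0
  | y :: rest => if y == x then runLen x rest + 1 else 0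

-- Outer while loop of B: consume one maximal run per step.
def bLoop (pos : Int) : List String → List (String × Int × Int)
  | [] => []
  | x :: rest =>
      let k := runLen x rest
      let tail := bLoop (pos + (k : Int) + 1) (rest.drop k)
      if x ≠ "" then (x, pos, pos + (k : Int)) :: tail else tail
termination_by l => l.length
decreasing_by simp [List.length_drop]

def get_feedback_spans_alt (feedbacks : List String) : List (String × Int × Int) :=
  bLoop 0 feedbacks

-- ===== PRECONDITION & SPEC =====
def Spec_get_feedback_spans (feedbacks : List String) (out : List (String × Int × Int)) : Prop := out = get_feedback_spans_alt feedbacks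
instance (feedbacks : List String) (out : List (String × Int × Int)) : Decidable (Spec_get_feedback_spans feedbacks out) := by unfold Spec_get_feedback_spans; infer_instance

-- ===== CLAIM (what is proved, stated in full; the proofs are below) =====
def Claim_equal_get_feedback_spans : Prop := ∀ (feedbacks : List String), Dom_get_feedback_spans feedbacks → Spec_get_feedback_spans feedbacks (get_feedback_spans feedbacks)

-- ===== LEMMAS AND PROOFS =====

-- Flush of A's final state, with `last` the last index of the whole input.
def aFlush (st : List (String × Int × Int) × Option String × Option Int) (last : Int) :
    List (String × Int × Int) :=
  match st.2.1, st.2.2 with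
  | some c, some q => st.1 ++ [(c, q, last)]
  | _, _ => st.1

-- What B produces from A's mid-loop state at position p with suffix l.
def bFrom (cur : Option String) (start : Option Int) (p : Int) (l : List String) :
    List (String × Int × Int) :=
  match cur, start with
  | some c, some q =>
      (c, q, p + (runLen c l : Int) - 1) :: bLoop (p + (runLen c l : Int)) (l.drop (runLen c l))
  | _, _ => bLoop p l

lemma bLoop_nil (p : Int) : bLoop p [] = [] := by
  rw [bLoop.eq_def]

lemma bLoop_cons (p : Int) (x : String) (rest : List String) :
    bLoop p (x :: rest) =
      if x ≠ "" then
        (x, p, p + (runLen x rest : Int)) ::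
          bLoop (p + (runLen x rest : Int) + 1) (rest.drop (runLen x rest))
      else bLoop (p + (runLen x rest : Int) + 1) (rest.drop (runLen x rest)) := by
  rw [bLoop.eq_def]

-- Skipping a maximal leading run of "" never changes B's output.
lemma bLoop_skip_empty (l : List String) (p : Int) :
    bLoop (p + (runLen "" l : Int)) (l.drop (runLen "" l)) = bLoop p l := by
  cases l with
  | nil => simp [runLen]
  | cons y rest =>
      by_cases hy : y = ""
      · subst hy
        have hk : runLen "" ("" :: rest) = runLen "" rest + 1 := by simp [runLen]
        rw [hk, bLoop_cons, if_neg (by simp), List.drop_succ_cons]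
        congr 1
        push_cast; ring
      · have hk : runLen "" (y :: rest) = 0 := by
          have hb : (y == "") = false := by simp [hy]
          simp [runLen, hb]
        simp [hk]

lemma bFrom_empty_cons (p : Int) (rest : List String) :
    bFrom none none (p + 1) rest = bFrom none none p ("" :: rest) := by
  simp only [bFrom]
  rw [bLoop_cons, if_neg (by simp)]
  rw [show p + (runLen "" rest : Int) + 1 = (p + 1) + (runLen "" rest : Int) by ring]
  exact (bLoop_skip_empty rest (p + 1)).symm

lemma bFrom_open_cons (p : Int) (x : String) (rest : List String) (hx : x ≠ "") :
    bFrom (some x) (some p) (p + 1) rest = bFrom none none p (x :: rest) := by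
  simp only [bFrom]
  rw [bLoop_cons, if_pos hx]
  rw [show p + 1 + (runLen x rest : Int) - 1 = p + (runLen x rest : Int) by ring,
      show p + 1 + (runLen x rest : Int) = p + (runLen x rest : Int) + 1 by ring]

lemma bFrom_cont_cons (p q : Int) (c : String) (rest : List String) :
    bFrom (some c) (some q) (p + 1) rest = bFrom (some c) (some q) p (c :: rest) := by
  simp only [bFrom]
  have hk : runLen c (c :: rest) = runLen c rest + 1 := by simp [runLen]
  rw [hk, List.drop_succ_cons]
  congr 2 <;> push_cast <;> ring

lemma runLen_break (c x : String) (rest : List String) (hxc : c ≠ x) :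
    runLen c (x :: rest) = 0 := by
  have hb : (x == c) = false := by
    simp only [beq_eq_false_iff_ne, ne_eq]
    exact fun h => hxc h.symm
  simp [runLen, hb]

lemma main_invariant (l : List String) : ∀ (p : Int) (s : List (String × Int × Int))
    (cur : Option String) (start : Option Int),
    ((cur = none ∧ start = none) ∨ (∃ c q, cur = some c ∧ start = some q ∧ c ≠ "")) →
    aFlush (aLoop (s, cur, start) p l) (p + (l.length : Int) - 1) = s ++ bFrom cur start p l := by
  induction l with
  | nil =>
      intro p s cur start hinv
      rcases hinv with ⟨hc, hs⟩ | ⟨c, q, hc, hs, hne⟩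
      · subst hc; subst hs; simp [aLoop, aFlush, bFrom, bLoop_nil]
      · subst hc; subst hs
        simp [aLoop, aFlush, bFrom, runLen, bLoop_nil]
  | cons x rest ih =>
      intro p s cur start hinv
      have hlen : p + ((x :: rest).length : Int) - 1
          = (p + 1) + (rest.length : Int) - 1 := by
        simp only [List.length_cons]; push_cast; ring
      rcases hinv with ⟨hc, hs⟩ | ⟨c, q, hc, hs, hne⟩
      · -- state empty: A may open a new run at x
        subst hc; subst hs
        by_cases hx : x = ""
        · subst hx
          have hstep : aStep (s, none, none) p "" = (s, none, none) := by
            simp [aStep]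
          rw [aLoop, hstep, hlen, ih (p + 1) s none none (Or.inl ⟨rfl, rfl⟩)]
          rw [bFrom_empty_cons]
        · have hstep : aStep (s, none, none) p x = (s, some x, some p) := by
            simp [aStep, hx]
          rw [aLoop, hstep, hlen,
              ih (p + 1) s (some x) (some p) (Or.inr ⟨x, p, rfl, rfl, hx⟩)]
          rw [bFrom_open_cons p x rest hx]
      · -- state carries an open run (c, q), with c ≠ ""
        subst hc; subst hs
        by_cases hxc : c = x
        · -- run continues
          subst hxc
          have hstep : aStep (s, some c, some q) p c = (s, some c, some q) := by
            simp [aStep, hne]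
          rw [aLoop, hstep, hlen,
              ih (p + 1) s (some c) (some q) (Or.inr ⟨c, q, rfl, rfl, hne⟩)]
          rw [bFrom_cont_cons]
        · -- run breaks at x: flush (c, q, p-1), maybe open a new run at x
          have hbreak : bFrom (some c) (some q) p (x :: rest)
              = (c, q, p - 1) :: bFrom none none p (x :: rest) := by
            simp only [bFrom, runLen_break c x rest hxc]
            norm_num
          by_cases hx : x = ""
          · subst hx
            have hstep : aStep (s, some c, some q) p "" =
                (s ++ [(c, q, p - 1)], none, none) := by
              simp [aStep, hne]
            rw [aLoop, hstep, hlen,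
                ih (p + 1) (s ++ [(c, q, p - 1)]) none none (Or.inl ⟨rfl, rfl⟩)]
            rw [bFrom_empty_cons, hbreak]
            simp
          · have hstep : aStep (s, some c, some q) p x =
                (s ++ [(c, q, p - 1)], some x, some p) := by
              have hcx : c ≠ x := hxc
              simp [aStep, hcx, hx]
            rw [aLoop, hstep, hlen,
                ih (p + 1) (s ++ [(c, q, p - 1)]) (some x) (some p)
                  (Or.inr ⟨x, p, rfl, rfl, hx⟩)]
            rw [bFrom_open_cons p x rest hx, hbreak]
            simp

-- ===== VERDICT (by name: the statement is the Claim_ definition above) =====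
theorem get_feedback_spans_spec : Claim_equal_get_feedback_spans := by
  intro feedbacks _
  unfold Spec_get_feedback_spans get_feedback_spans get_feedback_spans_alt
  have h := main_invariant feedbacks 0 [] none none (Or.inl ⟨rfl, rfl⟩)
  simp only [bFrom, List.nil_append] at h
  rw [show (0 : Int) + (feedbacks.length : Int) - 1 = (feedbacks.length : Int) - 1 by ring] at h
  unfold aFlush at h
  exact h
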